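-- pv_equiv track=rewrite | github.com/analise-algoritmos/projeto-aa | libs/lib-python/src/linear.py | burstsort
-- ===== SOURCE A (Python) =====
-- def burstsort(arr):
--     buckets = [[] for _ in range(256)]
--     for s in arr:
--         buckets[ord(s[0])].append(s)
--     sorted_arr = []
--     for b in buckets:
--         sorted_arr.extend(b)
--     return sorted_arr
-- ===== SOURCE B (Python) =====
-- def burstsort(arr):
--     return sorted(arr, key=lambda s: ord(s[0]))
-- ===== Notes on version B (the rewrite author's own statement) =====
-- stated objective: idiomatic
-- what changed: Replaces the hand-built 256-bucket distribution-and-concatenate passes with a single stable comparison sort, sorted(arr, key=lambda s: ord(s[0])), which produces the identical stable order.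
import Mathlib
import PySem

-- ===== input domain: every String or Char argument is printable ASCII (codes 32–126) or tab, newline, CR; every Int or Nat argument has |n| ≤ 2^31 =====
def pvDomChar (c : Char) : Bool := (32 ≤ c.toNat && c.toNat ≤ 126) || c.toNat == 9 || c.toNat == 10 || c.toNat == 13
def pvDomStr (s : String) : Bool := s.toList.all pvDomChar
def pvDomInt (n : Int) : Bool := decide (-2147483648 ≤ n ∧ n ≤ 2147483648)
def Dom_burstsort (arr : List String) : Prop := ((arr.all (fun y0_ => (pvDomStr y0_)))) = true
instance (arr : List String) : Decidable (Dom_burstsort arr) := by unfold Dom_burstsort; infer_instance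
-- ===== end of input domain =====

-- B replaces A's 256-bucket distribute-and-concatenate passes with Python's stable
-- comparison sort `sorted(arr, key=lambda s: ord(s[0]))` (idiomatic; same output order).

-- ord(s[0]) — shared helper of both ports; Pre_ guarantees s ≠ "", so headD's default is never used
def pvKey (s : String) : Nat := (s.toList.headD ' ').toNat

-- ===== PORT A =====
def burstsort (arr : List String) : List String :=
  let buckets := arr.foldl
    (fun (bs : List (List String)) s =>
      bs.set (pvKey s) (bs.getD (pvKey s) [] ++ [s]))  -- List.set is a no-op out of range; Dom keeps pvKey s < 256
    (List.replicate 256 ([] : List String))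
  buckets.foldl (fun acc b => acc ++ b) []

-- ===== PORT B =====
def burstsort_alt (arr : List String) : List String :=
  PySem.List.sorted arr (fun s => pvKey s)

-- ===== PRECONDITION & SPEC =====
-- Pre_ excludes exactly the inputs containing an empty string, on which A's s[0] raises IndexError.
def Pre_burstsort (arr : List String) : Prop := ∀ s ∈ arr, s.toList ≠ []
instance (arr : List String) : Decidable (Pre_burstsort arr) := by unfold Pre_burstsort; infer_instance
def pvWitness_burstsort : List String := ["b", "a", "ab", "a1", " x"]

def Spec_burstsort (arr : List String) (out : List String) : Prop := out = burstsort_alt arr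
instance (arr : List String) (out : List String) : Decidable (Spec_burstsort arr out) := by unfold Spec_burstsort; infer_instance

-- ===== CLAIM (what is proved, stated in full; the proofs are below) =====
def Claim_equal_burstsort : Prop := ∀ (arr : List String), Dom_burstsort arr → Pre_burstsort arr → Spec_burstsort arr (burstsort arr)

-- ===== LEMMAS AND PROOFS =====

-- the common normal form: buckets 0..n-1 written out in order, each bucket in input order
def pvF (n : Nat) (ys : List String) : List String :=
  (List.range n).flatMap (fun c => ys.filter (fun s => pvKey s == c))

lemma pv_set_map_range {α : Type} (n i : Nat) (f : Nat → α) (v : α) :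
    ((List.range n).map f).set i v = (List.range n).map (fun c => if c = i then v else f c) := by
  apply List.ext_getElem
  · simp
  · intro j h1 h2
    simp only [List.getElem_set, List.getElem_map, List.getElem_range] at *
    by_cases h : i = j
    · simp [h]
    · simp only [if_neg h, if_neg (fun hji : j = i => h hji.symm)]

lemma pv_getD_map_range {α : Type} (n i : Nat) (f : Nat → α) (d : α) (h : i < n) :
    ((List.range n).map f).getD i d = f i := by
  rw [List.getD_eq_getElem _ _ (by simpa using h)]
  simp

lemma pv_bucket_inv (arr p : List String) (h : ∀ s ∈ arr, pvKey s < 256) :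
    arr.foldl
      (fun (bs : List (List String)) s => bs.set (pvKey s) (bs.getD (pvKey s) [] ++ [s]))
      ((List.range 256).map (fun c => p.filter (fun s => pvKey s == c)))
    = (List.range 256).map (fun c => (p ++ arr).filter (fun s => pvKey s == c)) := by
  induction arr generalizing p with
  | nil => simp
  | cons s rest ih =>
    have hs : pvKey s < 256 := h s (by simp)
    rw [List.foldl_cons]
    have hstep :
        (((List.range 256).map (fun c => p.filter (fun t => pvKey t == c))).set (pvKey s)
            (((List.range 256).map (fun c => p.filter (fun t => pvKey t == c))).getD (pvKey s) [] ++ [s]))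
        = (List.range 256).map (fun c => (p ++ [s]).filter (fun t => pvKey t == c)) := by
      rw [pv_getD_map_range 256 _ _ _ hs, pv_set_map_range]
      apply List.map_congr_left
      intro c _
      by_cases hc : c = pvKey s
      · subst hc
        simp [List.filter_append]
      · have hb : (pvKey s == c) = false := by simp [Ne.symm hc]
        simp [List.filter_append, hb, hc]
    rw [hstep, ih (p ++ [s]) (fun t ht => h t (by simp [ht]))]
    simp

lemma pv_insertBy_split (before : String → String → Bool) (x : String) (A B : List String)
    (hA : ∀ y ∈ A, before x y = false) (hB : ∀ y ∈ B, before x y = true) :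
    PySem.List.insertBy before x (A ++ B) = A ++ x :: B := by
  induction A with
  | nil =>
    cases B with
    | nil => simp [PySem.List.insertBy]
    | cons b t => simp [PySem.List.insertBy, hB b (by simp)]
  | cons a t ih =>
    have ha : before x a = false := hA a (by simp)
    simp only [List.cons_append, PySem.List.insertBy, ha]
    simp [ih (fun y hy => hA y (by simp [hy]))]

lemma pv_sorted_eq_F (arr : List String) (h : ∀ s ∈ arr, pvKey s < 256) :
    PySem.List.sorted arr (fun s => pvKey s) = pvF 256 arr := by
  induction arr using List.reverseRecOn with
  | nil => rw [PySem.List.sorted_eq_foldl_insertBy]; simp [pvF]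
  | append_singleton ys x ih =>
    have hys : ∀ s ∈ ys, pvKey s < 256 := fun s hs => h s (by simp [hs])
    have hx : pvKey x < 256 := h x (by simp)
    rw [PySem.List.sorted_eq_foldl_insertBy, List.foldl_append, List.foldl_cons, List.foldl_nil,
        ← PySem.List.sorted_eq_foldl_insertBy, ih hys]
    -- split the 256 buckets at k = pvKey x
    set k := pvKey x with hk
    have h256 : (256 : Nat) = (k + 1) + (255 - k) := by omega
    have hsplit : ∀ zs : List String, pvF 256 zs
        = (List.range (k + 1)).flatMap (fun c => zs.filter (fun s => pvKey s == c))
          ++ ((List.range (255 - k)).map (fun j => (k + 1) + j)).flatMap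
              (fun c => zs.filter (fun s => pvKey s == c)) := by
      intro zs
      rw [pvF, h256, List.range_add, List.flatMap_append]
    rw [hsplit ys, hsplit (ys ++ [x])]
    -- low buckets of ys: elements with key ≤ k, insertBy walks past them
    have hA : ∀ y ∈ (List.range (k + 1)).flatMap (fun c => ys.filter (fun s => pvKey s == c)),
        (decide (k < pvKey y)) = false := by
      intro y hy
      simp only [List.mem_flatMap, List.mem_filter, List.mem_range, beq_iff_eq] at hy
      obtain ⟨c, hc, _, hkey⟩ := hy
      simp [hkey]; omega
    -- high buckets of ys: elements with key > k
    have hB : ∀ y ∈ ((List.range (255 - k)).map (fun j => (k + 1) + j)).flatMap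
        (fun c => ys.filter (fun s => pvKey s == c)),
        (decide (k < pvKey y)) = true := by
      intro y hy
      simp only [List.mem_flatMap, List.mem_map, List.mem_filter, List.mem_range, beq_iff_eq] at hy
      obtain ⟨c, ⟨j, _, hj⟩, _, hkey⟩ := hy
      simp [hkey]; omega
    rw [pv_insertBy_split _ x _ _ hA hB]
    -- low part of ys ++ [x]: x lands at the end of bucket k, the last low bucket
    have hlow1 : (List.range k).flatMap (fun c => (ys ++ [x]).filter (fun s => pvKey s == c))
        = (List.range k).flatMap (fun c => ys.filter (fun s => pvKey s == c)) := by
      apply List.flatMap_congr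
      intro c hc
      simp only [List.mem_range] at hc
      have hb : (pvKey x == c) = false := by simp; omega
      simp [List.filter_append, hb]
    have hlow : (List.range (k + 1)).flatMap (fun c => (ys ++ [x]).filter (fun s => pvKey s == c))
        = (List.range (k + 1)).flatMap (fun c => ys.filter (fun s => pvKey s == c)) ++ [x] := by
      rw [List.range_succ, List.flatMap_append, List.flatMap_append, hlow1]
      simp [List.filter_append, ← hk]
    -- high part unchanged: pvKey x = k, below every high bucket index
    have hhigh : ((List.range (255 - k)).map (fun j => (k + 1) + j)).flatMap
          (fun c => (ys ++ [x]).filter (fun s => pvKey s == c))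
        = ((List.range (255 - k)).map (fun j => (k + 1) + j)).flatMap
          (fun c => ys.filter (fun s => pvKey s == c)) := by
      apply List.flatMap_congr
      intro c hc
      simp only [List.mem_map, List.mem_range] at hc
      obtain ⟨j, _, hj⟩ := hc
      have hb : (pvKey x == c) = false := by simp; omega
      simp [List.filter_append, hb]
    rw [hlow, hhigh]
    simp

lemma pv_key_lt (arr : List String) (hd : Dom_burstsort arr) (hp : Pre_burstsort arr) :
    ∀ s ∈ arr, pvKey s < 256 := by
  intro s hs
  have hne := hp s hs
  have hdom : pvDomStr s = true := by
    unfold Dom_burstsort at hd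
    simp only [List.all_eq_true] at hd
    exact hd s hs
  unfold pvDomStr at hdom
  simp only [List.all_eq_true] at hdom
  cases hh : s.toList with
  | nil => exact absurd hh hne
  | cons c t =>
    have hc : pvDomChar c = true := hdom c (by rw [hh]; simp)
    unfold pvDomChar at hc
    simp only [Bool.or_eq_true, Bool.and_eq_true, decide_eq_true_eq, beq_iff_eq] at hc
    simp only [pvKey, hh, List.headD_cons]
    omega

-- ===== VERDICT (by name: the statement is the Claim_ definition above) =====
theorem burstsort_spec : Claim_equal_burstsort := by
  intro arr hd hp
  have hk := pv_key_lt arr hd hp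
  unfold Spec_burstsort burstsort burstsort_alt
  rw [pv_sorted_eq_F arr hk]
  have hinit : (List.replicate 256 ([] : List String))
      = (List.range 256).map (fun c => ([] : List String).filter (fun s => pvKey s == c)) := by
    simp [List.map_const']
  rw [hinit, pv_bucket_inv arr [] hk]
  simp only [List.nil_append]
  rw [PySem.List.foldl_append_eq_flatMap (fun b => b)]
  simp [pvF, List.flatMap_map]
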